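-- pv_equiv track=rewrite | github.com/romamik/aoc2025 | day12/shape3x3.py | shape_flip
-- ===== SOURCE A (Python) =====
-- def shape_get(shape: int, x: int, y: int) -> bool:
--     return (shape >> (y * 3 + x)) & 1 != 0
--
-- def shape_flip(shape: int) -> int:
--     new_shape = 0
--     for y in range(3):
--         for x in range(3):
--             if shape_get(shape, x, y):
--                 new_x, new_y = 2 - x, y
--                 new_shape |= 1 << (y * 3 + (2 - x))
--     return new_shape
-- ===== SOURCE B (Python) =====
-- def shape_flip(shape: int) -> int:
--     # Closed-form column swap: columns 0 and 2 exchange, column 1 stays.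
--     return ((shape & 0o111) << 2) | (shape & 0o222) | ((shape & 0o444) >> 2)
-- ===== Notes on version B (the rewrite author's own statement) =====
-- stated objective: simpler
-- what changed: Replaced the per-bit double loop with a single closed-form bitwise expression that swaps columns 0 and 2 using three fixed column masks.
import Mathlib
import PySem

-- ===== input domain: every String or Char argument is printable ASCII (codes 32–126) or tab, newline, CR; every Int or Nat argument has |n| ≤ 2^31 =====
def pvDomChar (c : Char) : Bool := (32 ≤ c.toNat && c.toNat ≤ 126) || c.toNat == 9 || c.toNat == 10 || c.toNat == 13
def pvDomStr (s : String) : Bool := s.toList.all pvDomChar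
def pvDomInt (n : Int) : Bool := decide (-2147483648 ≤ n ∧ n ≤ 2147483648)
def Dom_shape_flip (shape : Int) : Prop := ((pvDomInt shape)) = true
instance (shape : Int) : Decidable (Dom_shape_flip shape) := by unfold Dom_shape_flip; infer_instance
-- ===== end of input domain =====

-- B replaces A's per-bit double loop by one closed-form bitwise column swap (objective: simpler).

-- ===== PORT A =====
-- shift amounts y*3+x are always in 0..8 here, so .toNat is exact (Python '>>' with a nonnegative shift)
def shape_get (shape : Int) (x : Int) (y : Int) : Bool :=
  PySem.Int.band (shape >>> (y * 3 + x).toNat) 1 != 0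

def shape_flip (shape : Int) : Int :=
  (PySem.List.pyRange 0 3 1).foldl (fun new_shape y =>
    (PySem.List.pyRange 0 3 1).foldl (fun new_shape x =>
      if shape_get shape x y then
        PySem.Int.bor new_shape (1 <<< (y * 3 + (2 - x)).toNat)
      else new_shape) new_shape) 0

-- ===== PORT B =====
def shape_flip_alt (shape : Int) : Int :=
  PySem.Int.bor
    (PySem.Int.bor (PySem.Int.band shape 73 <<< (2 : Nat)) (PySem.Int.band shape 146))
    (PySem.Int.band shape 292 >>> (2 : Nat))

-- ===== PRECONDITION & SPEC =====
def Spec_shape_flip (shape : Int) (out : Int) : Prop := out = shape_flip_alt shape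
instance (shape : Int) (out : Int) : Decidable (Spec_shape_flip shape out) := by unfold Spec_shape_flip; infer_instance

-- ===== CLAIM (what is proved, stated in full; the proofs are below) =====
def Claim_equal_shape_flip : Prop := ∀ (shape : Int), Dom_shape_flip shape → Spec_shape_flip shape (shape_flip shape)

-- ===== LEMMAS AND PROOFS =====

-- both programs only read bits 0..8 of shape, so both are periodic with period 512

theorem pv_band_one_emod (a : Int) : PySem.Int.band a 1 = a % 2 := by
  rw [PySem.Int.band_one]
  simp [PySem.Int.mod, Int.fmod_eq_emod]

-- the bit tested by A's shape_get only depends on shape % 512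
theorem pv_cond512 (a : Int) (k : Nat) (hk : k ≤ 8) :
    PySem.Int.band (a >>> k) 1 = PySem.Int.band ((a % 512) >>> k) 1 := by
  rw [pv_band_one_emod, pv_band_one_emod, Int.shiftRight_eq_div_pow, Int.shiftRight_eq_div_pow]
  interval_cases k <;> norm_num <;> omega

theorem pv_get512 (a x y : Int) (hx : 0 ≤ x ∧ x < 3) (hy : 0 ≤ y ∧ y < 3) :
    shape_get a x y = shape_get (a % 512) x y := by
  unfold shape_get
  rw [pv_cond512 a (y * 3 + x).toNat (by omega)]

theorem pv_periodA (a : Int) : shape_flip a = shape_flip (a % 512) := by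
  unfold shape_flip
  refine PySem.List.foldl_congr_mem _ _ _ _ fun acc y hy => ?_
  refine PySem.List.foldl_congr_mem _ _ _ _ fun acc2 x hx => ?_
  have hy3 : y = 0 ∨ y = 1 ∨ y = 2 := by
    have : PySem.List.pyRange 0 3 1 = [0, 1, 2] := by decide
    rw [this] at hy; simpa using hy
  have hx3 : x = 0 ∨ x = 1 ∨ x = 2 := by
    have : PySem.List.pyRange 0 3 1 = [0, 1, 2] := by decide
    rw [this] at hx; simpa using hx
  rw [pv_get512 a x y (by omega) (by omega)]

theorem pv_natAnd (n m : Nat) (hm : m < 512) : n % 512 &&& m = n &&& m := by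
  refine Nat.eq_of_testBit_eq fun i => ?_
  rw [Nat.testBit_and, Nat.testBit_and, show (512 : Nat) = 2 ^ 9 from rfl, Nat.testBit_mod_two_pow]
  by_cases h : i < 9
  · simp [h]
  · have h9 : (512 : Nat) ≤ 2 ^ i := by
      calc (512 : Nat) = 2 ^ 9 := rfl
        _ ≤ 2 ^ i := Nat.pow_le_pow_right (by norm_num) (by omega)
    have hmi : m.testBit i = false := Nat.testBit_lt_two_pow (lt_of_lt_of_le hm h9)
    simp [h, hmi]

-- a mask's &-with-v complement identity, checked for all v < 512 at the three masks used by B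
theorem pv_band_mask (a : Int) (m : Nat) (hm : m < 512)
    (hld : ∀ v, v < 512 → m - (m &&& v) = (511 - v) &&& m) :
    PySem.Int.band a (m : Int) = PySem.Int.band (a % 512) (m : Int) := by
  by_cases ha : 0 ≤ a
  · rw [PySem.Int.band_of_nonneg ha (by positivity),
        PySem.Int.band_of_nonneg (by omega) (by positivity)]
    have h1 : (a % 512).toNat = a.toNat % 512 := by omega
    rw [h1, Int.toNat_natCast, pv_natAnd _ _ hm]
  · have hm0 : (0 : Int) ≤ (m : Int) := by positivity
    rw [show PySem.Int.band a (m : Int)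
          = ((m : Int).toNat - ((m : Int).toNat &&& (-a - 1).toNat) : Nat) from by
        simp only [PySem.Int.band, if_neg ha, if_pos hm0],
      PySem.Int.band_of_nonneg (by omega) hm0]
    have hu : m &&& ((-a - 1).toNat % 512) = m &&& (-a - 1).toNat := by
      rw [Nat.and_comm m ((-a - 1).toNat % 512), Nat.and_comm m (-a - 1).toNat]
      exact pv_natAnd _ _ hm
    have h2 : (a % 512).toNat = 511 - (-a - 1).toNat % 512 := by omega
    rw [Int.toNat_natCast, ← hu, hld _ (by omega), h2, Nat.and_comm]

set_option maxRecDepth 20000 in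
theorem pv_periodB (a : Int) : shape_flip_alt a = shape_flip_alt (a % 512) := by
  have h73 : PySem.Int.band a 73 = PySem.Int.band (a % 512) 73 := by
    simpa using pv_band_mask a 73 (by norm_num) (by decide)
  have h146 : PySem.Int.band a 146 = PySem.Int.band (a % 512) 146 := by
    simpa using pv_band_mask a 146 (by norm_num) (by decide)
  have h292 : PySem.Int.band a 292 = PySem.Int.band (a % 512) 292 := by
    simpa using pv_band_mask a 292 (by norm_num) (by decide)
  unfold shape_flip_alt
  rw [h73, h146, h292]

set_option maxRecDepth 20000 in
theorem pv_small : ∀ n : Nat, n < 512 → shape_flip (n : Int) = shape_flip_alt (n : Int) := by decide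

-- ===== VERDICT (by name: the statement is the Claim_ definition above) =====
theorem shape_flip_spec : Claim_equal_shape_flip := by
  intro a _
  unfold Spec_shape_flip
  rw [pv_periodA, pv_periodB]
  have h1 : (0 : Int) ≤ a % 512 := by omega
  have h2 : a % 512 = ((a % 512).toNat : Int) := (Int.toNat_of_nonneg h1).symm
  rw [h2]
  exact pv_small _ (by omega)
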